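-- pv_equiv track=rewrite | github.com/GoforMastery/GoforMastery-codecrafters-grep-python | app/main.py | negativeCharGroup
-- ===== SOURCE A (Python) =====
-- def negativeCharGroup(given, goal):
--     umap = {}
--     for c in goal:
--         umap[c] = True
--     for char in given:
--         if char not in umap:
--             return True
--     return False
-- ===== SOURCE B (Python) =====
-- def negativeCharGroup(given, goal):
--     # Counting argument: the distinct chars of given+goal outnumber those of
--     # goal exactly when given contains a char absent from goal.
--     return len(set(given + goal)) > len(set(goal))
-- ===== Notes on version B (the rewrite author's own statement) =====
-- stated objective: alternative
-- what changed: Replaced A's build-a-membership-dict-then-scan-given-with-early-return by a cardinality comparison: B never tests membership of any char of given, it counts distinct characters and returns len(set(given+goal)) > len(set(goal)).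
import Mathlib
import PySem

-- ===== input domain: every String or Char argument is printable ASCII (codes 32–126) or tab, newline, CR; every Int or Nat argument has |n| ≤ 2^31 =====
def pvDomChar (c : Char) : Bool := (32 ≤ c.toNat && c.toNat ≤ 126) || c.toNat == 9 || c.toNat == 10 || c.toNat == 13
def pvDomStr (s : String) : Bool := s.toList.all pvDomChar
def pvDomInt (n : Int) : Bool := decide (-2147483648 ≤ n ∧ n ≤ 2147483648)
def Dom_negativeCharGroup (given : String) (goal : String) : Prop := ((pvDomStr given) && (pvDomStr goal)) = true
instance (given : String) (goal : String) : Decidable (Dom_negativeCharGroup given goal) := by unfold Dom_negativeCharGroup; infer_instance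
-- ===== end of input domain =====

-- B replaces A's membership-dict + early-return scan with a cardinality comparison
-- len(set(given+goal)) > len(set(goal)) (alternative formulation; return value only).

-- ===== PORT A =====
-- the 'for char in given: if char not in umap: return True' loop, early return and all
def pvScanA (umap : PySem.Dict Char Bool) : List Char → Bool
  | [] => false
  | c :: rest => if ¬ umap.contains c then true else pvScanA umap rest

def negativeCharGroup (given : String) (goal : String) : Bool :=
  let umap := goal.toList.foldl (fun d c => d.insert c true) PySem.Dict.empty
  pvScanA umap given.toList

-- ===== PORT B =====
def negativeCharGroup_alt (given : String) (goal : String) : Bool :=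
  decide (PySem.Set.len (PySem.Set.ofList (given ++ goal).toList)
            > PySem.Set.len (PySem.Set.ofList goal.toList))

-- ===== PRECONDITION & SPEC =====
def Spec_negativeCharGroup (given : String) (goal : String) (out : Bool) : Prop := out = negativeCharGroup_alt given goal
instance (given : String) (goal : String) (out : Bool) : Decidable (Spec_negativeCharGroup given goal out) := by unfold Spec_negativeCharGroup; infer_instance

-- ===== CLAIM (what is proved, stated in full; the proofs are below) =====
def Claim_equal_negativeCharGroup : Prop := ∀ (given : String) (goal : String), Dom_negativeCharGroup given goal → Spec_negativeCharGroup given goal (negativeCharGroup given goal)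

-- ===== LEMMAS AND PROOFS =====

-- A's scan returns true iff some char of the list is absent from the dict
theorem pvScanA_eq_any (umap : PySem.Dict Char Bool) (l : List Char) :
    pvScanA umap l = l.any (fun c => !(umap.contains c)) := by
  induction l with
  | nil => rfl
  | cons c rest ih =>
    simp only [pvScanA, List.any_cons]
    by_cases h : umap.contains c = true <;> simp [h, ih]

theorem contains_foldl_insert (l : List Char) (c : Char) :
    (l.foldl (fun d x => d.insert x true) (PySem.Dict.empty : PySem.Dict Char Bool)).contains c
      = l.contains c := by
  rw [PySem.Dict.contains_eq_decide_mem_keys,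
    PySem.Dict.keys_foldl_insert (l := l) (f := fun _ _ => true)
      (d := (PySem.Dict.empty : PySem.Dict Char Bool))]
  have hk : (PySem.Dict.empty : PySem.Dict Char Bool).keys = [] := rfl
  rw [hk, PySem.Set.update_nil_left]
  by_cases hc : c ∈ l <;> simp [PySem.Set.mem_ofList, hc]

-- a Python set's size is the card of its element list's Finset
theorem ofList_length_eq_card (l : List Char) :
    (PySem.Set.ofList l).length = l.toFinset.card := by
  have hnd : (PySem.Set.ofList l).Nodup := PySem.Set.nodup_ofList l
  have hfs : (PySem.Set.ofList l).toFinset = l.toFinset := by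
    apply Finset.ext; intro x
    simp [List.mem_toFinset, PySem.Set.mem_ofList]
  rw [← List.toFinset_card_of_nodup hnd, hfs]

-- the counting characterisation: strictly more distinct chars in a++b than in b
-- iff some char of a is absent from b
theorem card_union_gt_iff (a b : List Char) :
    ((a ++ b).toFinset.card > b.toFinset.card) ↔ ∃ c ∈ a, c ∉ b := by
  rw [List.toFinset_append]
  constructor
  · intro h
    by_contra hno
    push Not at hno
    have hsub : a.toFinset ⊆ b.toFinset := by
      intro x hx
      rw [List.mem_toFinset] at hx ⊢
      exact hno x hx
    rw [Finset.union_eq_right.2 hsub] at h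
    omega
  · rintro ⟨c, hc, hnc⟩
    apply Finset.card_lt_card
    constructor
    · exact Finset.subset_union_right
    · intro hsub
      have : c ∈ b.toFinset := hsub (by simp [List.mem_toFinset, hc])
      rw [List.mem_toFinset] at this
      exact hnc this

-- ===== VERDICT (by name: the statement is the Claim_ definition above) =====
theorem negativeCharGroup_spec : Claim_equal_negativeCharGroup := by
  intro given goal _
  unfold Spec_negativeCharGroup negativeCharGroup negativeCharGroup_alt
  rw [pvScanA_eq_any]
  have hlen : ∀ l : List Char, PySem.Set.len (PySem.Set.ofList l) = (l.toFinset.card : Int) := by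
    intro l
    simp [PySem.Set.len, ofList_length_eq_card]
  rw [String.toList_append, hlen, hlen]
  by_cases h : ∃ c ∈ given.toList, c ∉ goal.toList
  · obtain ⟨c, hc, hnc⟩ := h
    have hgt := (card_union_gt_iff given.toList goal.toList).2 ⟨c, hc, hnc⟩
    have hr : decide (((given.toList ++ goal.toList).toFinset.card : Int) > (goal.toList.toFinset.card : Int)) = true := by
      rw [List.toFinset_append] at hgt
      simp; exact_mod_cast hgt
    rw [hr, List.any_eq_true]
    refine ⟨c, hc, ?_⟩
    simp [contains_foldl_insert, hnc]
  · have hngt : ¬ ((given.toList ++ goal.toList).toFinset.card > goal.toList.toFinset.card) :=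
      fun hgt => h ((card_union_gt_iff given.toList goal.toList).1 hgt)
    have hr : decide (((given.toList ++ goal.toList).toFinset.card : Int) > (goal.toList.toFinset.card : Int)) = false := by
      rw [List.toFinset_append] at hngt
      simp; exact_mod_cast Nat.not_lt.1 hngt
    rw [hr, List.any_eq_false]
    intro c hc
    push Not at h
    simp [contains_foldl_insert, h c hc]
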